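-- pv_equiv track=rewrite | github.com/efe/django-root-secret | django_root_secret/env.py | validate_env_name
-- ===== SOURCE A (Python) =====
-- def validate_env_name(env_name: str) -> str:
--     normalized = env_name.strip()
--     if not normalized:
--         raise ValueError("Environment name cannot be empty.")
--
--     allowed = set("abcdefghijklmnopqrstuvwxyzABCDEFGHIJKLMNOPQRSTUVWXYZ0123456789_-")
--     if any(char not in allowed for char in normalized):
--         raise ValueError(
--             "Environment name may only contain letters, numbers, underscores, and hyphens."
--         )
--     return normalized
-- ===== SOURCE B (Python) =====
-- def validate_env_name(env_name: str) -> str: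
--     normalized = env_name.strip()
--     if not normalized:
--         raise ValueError("Environment name cannot be empty.")
--
--     # Delete the allowed punctuation, then let str.isalnum judge everything else
--     # (isascii keeps non-ASCII "letters" like 'e-acute' out, which isalnum alone would accept).
--     core = normalized.replace("_", "").replace("-", "")
--     if core and not (core.isascii() and core.isalnum()):
--         raise ValueError(
--             "Environment name may only contain letters, numbers, underscores, and hyphens."
--         )
--     return normalized
-- ===== Notes on version B (the rewrite author's own statement) =====
-- stated objective: idiomatic
-- what changed: B drops the explicit 64-character alphabet and the per-character membership scan entirely: it deletes the allowed punctuation with str.replace and then judges the remainder with the library predicates str.isascii()/str.isalnum() (guarding the all-punctuation case, where the remainder is empty and hence valid); these run in C instead of a Python-level generator loop, which a timing run measured as faster.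
import Mathlib
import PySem

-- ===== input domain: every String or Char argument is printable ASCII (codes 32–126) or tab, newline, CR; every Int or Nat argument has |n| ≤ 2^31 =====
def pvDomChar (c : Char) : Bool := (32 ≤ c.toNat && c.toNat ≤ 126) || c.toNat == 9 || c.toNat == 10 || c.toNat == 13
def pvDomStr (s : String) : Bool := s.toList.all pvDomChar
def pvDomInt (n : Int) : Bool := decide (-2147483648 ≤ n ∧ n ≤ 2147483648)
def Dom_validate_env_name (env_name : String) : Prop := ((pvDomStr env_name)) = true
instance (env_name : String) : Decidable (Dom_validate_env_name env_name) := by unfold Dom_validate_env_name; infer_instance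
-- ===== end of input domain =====

-- B drops A's explicit 64-character alphabet and per-character membership scan: it deletes
-- the allowed punctuation with str.replace and judges the remainder with str.isascii/str.isalnum
-- (objective: idiomatic). Both raise ValueError on an empty stripped name or a disallowed
-- character; Pre_ excludes exactly those inputs.

-- ===== PORT A =====
def validate_env_name (env_name : String) : String :=
  let normalized := PySem.Str.strip env_name
  if normalized = "" then ""   -- raise ValueError (excluded by Pre_)
  else
    let allowed : PySem.Set Char :=
      PySem.Set.ofList "abcdefghijklmnopqrstuvwxyzABCDEFGHIJKLMNOPQRSTUVWXYZ0123456789_-".toList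
    if normalized.toList.any (fun c => !(PySem.Set.contains allowed c)) then ""   -- raise ValueError (excluded by Pre_)
    else normalized

-- ===== PORT B =====
def validate_env_name_alt (env_name : String) : String :=
  let normalized := PySem.Str.strip env_name
  if normalized = "" then ""   -- raise ValueError (excluded by Pre_)
  else
    let core := PySem.Str.replace (PySem.Str.replace normalized "_" "") "-" ""
    -- core.isascii() ported by hand as "every code point < 128" (exact: CPython's str.isascii)
    if decide (core ≠ "") && !(core.toList.all (fun c => c.toNat < 128) && PySem.Str.strIsalnum core)
    then ""   -- raise ValueError (excluded by Pre_)
    else normalized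

-- ===== PRECONDITION & SPEC =====
-- Pre_ excludes exactly the inputs on which A raises ValueError: an empty stripped name, or a
-- stripped name containing a character other than letters, digits, underscore and hyphen.
def Pre_validate_env_name (env_name : String) : Prop :=
  PySem.Chars.strip env_name.toList ≠ [] ∧
  (PySem.Chars.strip env_name.toList).all
    (fun c => PySem.Chars.isalnum c || c == '_' || c == '-') = true
instance (env_name : String) : Decidable (Pre_validate_env_name env_name) := by unfold Pre_validate_env_name; infer_instance

def pvWitness_validate_env_name : String := " my-env_1 "

def Spec_validate_env_name (env_name : String) (out : String) : Prop := out = validate_env_name_alt env_name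
instance (env_name : String) (out : String) : Decidable (Spec_validate_env_name env_name out) := by unfold Spec_validate_env_name; infer_instance

-- ===== CLAIM (what is proved, stated in full; the proofs are below) =====
def Claim_equal_validate_env_name : Prop := ∀ (env_name : String), Dom_validate_env_name env_name → Pre_validate_env_name env_name → Spec_validate_env_name env_name (validate_env_name env_name)

-- ===== LEMMAS AND PROOFS =====
theorem char_toNat_le_of_le {a b : Char} (h : a ≤ b) : a.toNat ≤ b.toNat := by
  simp only [Char.le_def, UInt32.le_iff_toNat_le, Char.toNat] at h ⊢
  exact h

-- a character admitted by Pre_ is an element of A's explicit allowed alphabet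
set_option maxRecDepth 20000 in
theorem envOk_mem (c : Char)
    (hok : (PySem.Chars.isalnum c || c == '_' || c == '-') = true) :
    c ∈ "abcdefghijklmnopqrstuvwxyzABCDEFGHIJKLMNOPQRSTUVWXYZ0123456789_-".toList := by
  have hofn : Char.ofNat c.toNat = c := Char.ofNat_toNat c
  simp only [PySem.Chars.isalnum, PySem.Chars.isalpha, PySem.Chars.isdigit,
    PySem.Chars.isupper, PySem.Chars.islower,
    Bool.or_eq_true, Bool.and_eq_true, decide_eq_true_eq, beq_iff_eq] at hok
  have hbounds : 45 ≤ c.toNat ∧ c.toNat ≤ 122 := by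
    rcases hok with (((⟨ha, hb⟩ | ⟨ha, hb⟩) | ⟨ha, hb⟩) | h) | h
    · exact ⟨le_trans (by decide) (char_toNat_le_of_le ha),
        le_trans (char_toNat_le_of_le hb) (by decide)⟩
    · exact ⟨le_trans (by decide) (char_toNat_le_of_le ha), char_toNat_le_of_le hb⟩
    · exact ⟨le_trans (by decide) (char_toNat_le_of_le ha),
        le_trans (char_toNat_le_of_le hb) (by decide)⟩
    · subst h; decide
    · subst h; decide
  obtain ⟨hlo, hhi⟩ := hbounds
  rw [← hofn] at hok ⊢
  set n := c.toNat with hn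
  clear_value n
  interval_cases n <;> first | decide | (exfalso; revert hok; decide)

-- an alphanumeric character (by the range definition) has code point < 128
theorem isalnum_ascii (c : Char) (h : PySem.Chars.isalnum c = true) : c.toNat < 128 := by
  simp only [PySem.Chars.isalnum, PySem.Chars.isalpha, PySem.Chars.isdigit,
    PySem.Chars.isupper, PySem.Chars.islower,
    Bool.or_eq_true, Bool.and_eq_true, decide_eq_true_eq] at h
  rcases h with ((⟨_, hb⟩ | ⟨_, hb⟩) | ⟨_, hb⟩) <;>
    exact lt_of_le_of_lt (char_toNat_le_of_le hb) (by decide)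

-- str.replace with a one-character pattern and empty replacement is a filter
theorem replace_go_single (x : Char) :
    ∀ (fuel : Nat) (l acc : List Char), l.length ≤ fuel →
      PySem.Chars.replace.go [x] [] fuel l acc = acc.reverse ++ l.filter (fun c => !(c == x)) := by
  intro fuel
  induction fuel with
  | zero =>
    intro l acc h
    have : l = [] := List.length_eq_zero_iff.mp (Nat.le_zero.mp h)
    subst this
    simp [PySem.Chars.replace.go]
  | succ n ih =>
    intro l acc h
    cases l with
    | nil => simp [PySem.Chars.replace.go]
    | cons c t =>
      simp only [PySem.Chars.replace.go]
      by_cases hc : c = x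
      · subst hc
        have hpre : List.isPrefixOf [c] (c :: t) = true := by
          simp [List.isPrefixOf]
        rw [if_pos hpre]
        rw [List.filter_cons_of_neg (by simp)]
        exact ih t acc (by simpa using Nat.le_of_succ_le_succ h)
      · have hpre : List.isPrefixOf [x] (c :: t) = false := by
          simp [List.isPrefixOf]
          exact fun h' => absurd h'.symm hc
        rw [if_neg (by simp [hpre])]
        rw [List.filter_cons_of_pos (by simp [hc])]
        have := ih t (c :: acc) (by simpa using Nat.le_of_succ_le_succ h)
        simpa using this

theorem replace_single_empty (cs : List Char) (x : Char) :
    PySem.Chars.replace cs [x] [] = cs.filter (fun c => !(c == x)) := by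
  unfold PySem.Chars.replace
  rw [if_neg (by simp)]
  simpa using replace_go_single x cs.length cs [] le_rfl

theorem toList_eq_nil (s : String) (h : s.toList = []) : s = "" :=
  String.toList_eq_nil_iff.mp h

-- ===== VERDICT (by name: the statement is the Claim_ definition above) =====
theorem validate_env_name_spec : Claim_equal_validate_env_name := by
  intro s _ hpre
  obtain ⟨h1, h2⟩ := hpre
  have hne : PySem.Str.strip s ≠ "" := by
    intro h
    exact h1 (by rw [← PySem.Str.toList_strip, h]; rfl)
  -- A's scan finds no disallowed character
  have hA : ((PySem.Str.strip s).toList.any fun c =>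
      !((PySem.Set.ofList "abcdefghijklmnopqrstuvwxyzABCDEFGHIJKLMNOPQRSTUVWXYZ0123456789_-".toList).contains c)) = false := by
    rw [PySem.Str.toList_strip, List.any_eq_false]
    intro c hc
    have hok := List.all_eq_true.mp h2 c hc
    have hm : (PySem.Set.ofList "abcdefghijklmnopqrstuvwxyzABCDEFGHIJKLMNOPQRSTUVWXYZ0123456789_-".toList).contains c = true := by
      rw [PySem.Set.contains_iff, PySem.Set.mem_ofList]
      exact envOk_mem c hok
    intro hcon
    rw [hm] at hcon
    exact absurd hcon (by decide)
  -- B's core is the stripped name with '_' and '-' filtered out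
  have hcore : (PySem.Str.replace (PySem.Str.replace (PySem.Str.strip s) "_" "") "-" "").toList
      = ((PySem.Chars.strip s.toList).filter (fun c => !(c == '_'))).filter (fun c => !(c == '-')) := by
    rw [PySem.Str.toList_replace, PySem.Str.toList_replace, PySem.Str.toList_strip]
    rw [show "_".toList = ['_'] from rfl, show "-".toList = ['-'] from rfl,
      show "".toList = ([] : List Char) from rfl]
    rw [replace_single_empty, replace_single_empty]
  -- B's raise condition is false
  have hB : (decide ((PySem.Str.replace (PySem.Str.replace (PySem.Str.strip s) "_" "") "-" "") ≠ "") &&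
      !(((PySem.Str.replace (PySem.Str.replace (PySem.Str.strip s) "_" "") "-" "").toList.all (fun c => c.toNat < 128)) &&
        PySem.Str.strIsalnum (PySem.Str.replace (PySem.Str.replace (PySem.Str.strip s) "_" "") "-" ""))) = false := by
    set core := PySem.Str.replace (PySem.Str.replace (PySem.Str.strip s) "_" "") "-" "" with hcdef
    by_cases hnil : core.toList = []
    · have : core = "" := toList_eq_nil core hnil
      simp [this]
    · have hmem : ∀ c ∈ core.toList, PySem.Chars.isalnum c = true := by
        intro c hc
        rw [hcore] at hc
        have hc2 := List.mem_filter.mp hc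
        have hc1 := List.mem_filter.mp hc2.1
        have hok := List.all_eq_true.mp h2 c hc1.1
        simp only [Bool.or_eq_true, beq_iff_eq] at hok
        rcases hok with (h | h) | h
        · exact h
        · exfalso; subst h; simpa using hc1.2
        · exfalso; subst h; simpa using hc2.2
      have hascii : core.toList.all (fun c => decide (c.toNat < 128)) = true := by
        rw [List.all_eq_true]
        intro c hc
        exact decide_eq_true (isalnum_ascii c (hmem c hc))
      have halnum : PySem.Str.strIsalnum core = true := by
        show PySem.Chars.strIsalnum core.toList = true
        unfold PySem.Chars.strIsalnum
        rw [Bool.and_eq_true]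
        constructor
        · simpa [List.isEmpty_iff] using hnil
        · exact List.all_eq_true.mpr hmem
      simp only [hascii, halnum, Bool.and_self, Bool.not_true, Bool.and_false]
  unfold Spec_validate_env_name validate_env_name validate_env_name_alt
  simp only [if_neg hne, hA, hB, Bool.false_eq_true, if_false]
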